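-- pv_equiv track=rewrite | github.com/RaaaayN/git-project-manager | tools/project_os_agent_lib/kpi.py | _compute_pipeline_green_streak
-- ===== SOURCE A (Python) =====
-- def _compute_pipeline_green_streak(pipeline_states: list[str]) -> int:
--     streak = 0
--     for state in reversed(pipeline_states):
--         lowered = state.lower().strip()
--         if lowered in {"success", "passed"}:
--             streak += 1
--             continue
--         break
--     return streak
-- ===== SOURCE B (Python) =====
-- def _compute_pipeline_green_streak(pipeline_states: list[str]) -> int:
--     streak = 0
--     for state in pipeline_states:
--         if state.lower().strip() in {"success", "passed"}:
--             streak += 1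
--         else:
--             streak = 0
--     return streak
-- ===== Notes on version B (the rewrite author's own statement) =====
-- stated objective: alternative
-- what changed: B scans forward with a resettable counter (reset to 0 on any non-green state) instead of A's reversed iteration with an early break.
import Mathlib
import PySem

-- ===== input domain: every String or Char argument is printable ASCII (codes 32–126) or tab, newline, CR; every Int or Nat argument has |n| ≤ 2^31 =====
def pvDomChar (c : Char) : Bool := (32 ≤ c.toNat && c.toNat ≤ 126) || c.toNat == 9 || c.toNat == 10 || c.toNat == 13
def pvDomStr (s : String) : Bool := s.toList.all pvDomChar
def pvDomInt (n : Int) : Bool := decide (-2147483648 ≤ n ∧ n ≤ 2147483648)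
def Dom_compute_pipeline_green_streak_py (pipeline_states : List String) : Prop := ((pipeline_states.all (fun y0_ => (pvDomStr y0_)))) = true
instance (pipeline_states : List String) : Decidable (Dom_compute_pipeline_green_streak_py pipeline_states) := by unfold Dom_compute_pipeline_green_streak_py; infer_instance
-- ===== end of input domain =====

-- B replaces A's reversed-iteration-with-break by a forward pass with a resettable counter (same O(n) cost, different decomposition).


-- ===== PORT A =====
-- A: iterate over reversed list; increment while green, break on first non-green.
def pvGreen (s : String) : Bool :=
  PySem.Str.strip (PySem.Str.lower s) == "success" || PySem.Str.strip (PySem.Str.lower s) == "passed"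

def pvGoA : List String → Int
  | [] => 0
  | state :: rest => if pvGreen state then pvGoA rest + 1 else 0

def compute_pipeline_green_streak_py (pipeline_states : List String) : Int :=
  pvGoA pipeline_states.reverse

-- ===== PORT B =====
-- B: single forward pass with a resettable counter.
def compute_pipeline_green_streak_py_alt (pipeline_states : List String) : Int :=
  pipeline_states.foldl (fun streak state => if pvGreen state then streak + 1 else 0) 0

-- ===== PRECONDITION & SPEC =====
def Spec_compute_pipeline_green_streak_py (pipeline_states : List String) (out : Int) : Prop := out = compute_pipeline_green_streak_py_alt pipeline_states
instance (pipeline_states : List String) (out : Int) : Decidable (Spec_compute_pipeline_green_streak_py pipeline_states out) := by unfold Spec_compute_pipeline_green_streak_py; infer_instance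

-- ===== CLAIM (what is proved, stated in full; the proofs are below) =====
def Claim_equal_compute_pipeline_green_streak_py : Prop := ∀ (pipeline_states : List String), Dom_compute_pipeline_green_streak_py pipeline_states → Spec_compute_pipeline_green_streak_py pipeline_states (compute_pipeline_green_streak_py pipeline_states)

-- ===== LEMMAS AND PROOFS =====

lemma pv_fold_eq (l : List String) :
    l.foldl (fun streak state => if pvGreen state then streak + 1 else 0) 0 = pvGoA l.reverse := by
  induction l using List.reverseRecOn with
  | nil => rfl
  | append_singleton l x ih =>
    rw [List.foldl_append, List.reverse_append]
    simp only [List.foldl_cons, List.foldl_nil, List.reverse_singleton, List.singleton_append,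
      pvGoA, ih]

-- ===== VERDICT (by name: the statement is the Claim_ definition above) =====
theorem compute_pipeline_green_streak_py_spec : Claim_equal_compute_pipeline_green_streak_py := by
  intro l _
  unfold Spec_compute_pipeline_green_streak_py compute_pipeline_green_streak_py
    compute_pipeline_green_streak_py_alt
  rw [pv_fold_eq]
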